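-- pv_equiv track=rewrite | github.com/rzshrote/pybrops | pybrops/core/util/crossix.py | threewayix_symab_anyab_backc
-- ===== SOURCE A (Python) =====
-- from typing import Generator
--
-- def threewayix_symab_anyab_backc(ntaxa: int) -> Generator:
--     """
--     Generate indices for three-way parent crosses with the following constraints:
--
--     1) Assume symmetric mate pairings for (AxB) cross: (A x B) == (B x A)
--     2) Allow (AxB) selfing, allow (AxB) outcrossing
--     3) Only permit backcrossing for the recurrent parent: C == (A or B).
--
--     Parameters
--     ----------
--     ntaxa : int
--         Number of taxa eligible to serve as parents.
--
--     Yields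
--     ------
--     out : tuple
--         Tuple of indices. Indices are (recurrent,female,male) == (C x (A x B)).
--     """
--     if ntaxa <= 0:
--         yield from ()
--     for recurrent in range(ntaxa):
--         male = recurrent
--         for female in range(recurrent):
--             yield (recurrent,female,male)
--         female = recurrent
--         for male in range(female,ntaxa):
--             yield (recurrent,female,male)
-- ===== SOURCE B (Python) =====
-- from typing import Generator
--
-- def threewayix_symab_anyab_backc(ntaxa: int) -> Generator:
--     # Flat enumeration: the k-th tuple (k = 0 .. n*n-1) is computed in closed
--     # form from k alone via divmod, with the (female, male) pair sorted.
--     n = ntaxa if ntaxa > 0 else 0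
--     for k in range(n * n):
--         recurrent, other = divmod(k, n)
--         yield (recurrent, other, recurrent) if other < recurrent else (recurrent, recurrent, other)
-- ===== Notes on version B (the rewrite author's own statement) =====
-- stated objective: alternative
-- what changed: Replaced A's nested loops (outer recurrent loop with two partitioned inner range-loops) by a single flat loop over all n*n flat indices, recovering each tuple in closed form from the flat index k via divmod(k, n).
import Mathlib
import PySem

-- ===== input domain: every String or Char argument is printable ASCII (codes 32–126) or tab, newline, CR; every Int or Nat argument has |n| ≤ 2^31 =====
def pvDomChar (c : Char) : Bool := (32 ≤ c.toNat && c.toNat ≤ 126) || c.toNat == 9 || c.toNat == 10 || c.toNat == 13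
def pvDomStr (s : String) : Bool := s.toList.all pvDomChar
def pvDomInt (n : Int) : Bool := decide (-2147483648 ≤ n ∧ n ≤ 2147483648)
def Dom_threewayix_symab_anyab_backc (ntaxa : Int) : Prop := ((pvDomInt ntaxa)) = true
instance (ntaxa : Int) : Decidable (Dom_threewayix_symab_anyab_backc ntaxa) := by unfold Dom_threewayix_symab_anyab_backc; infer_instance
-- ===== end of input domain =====

-- B replaces A's nested loops by one flat loop over all n*n flat indices, recovering each
-- tuple in closed form from the flat index via divmod (objective: alternative).

-- ===== PORT A =====
-- A's 'if ntaxa <= 0: yield from ()' yields nothing and is a no-op; the fold over an empty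
-- range already produces [].
def threewayix_symab_anyab_backc (ntaxa : Int) : List (Int × Int × Int) :=
  (PySem.List.pyRange 0 ntaxa 1).foldl
    (fun acc recurrent =>
      (acc ++ (PySem.List.pyRange 0 recurrent 1).map (fun female => (recurrent, female, recurrent)))
          ++ (PySem.List.pyRange recurrent ntaxa 1).map (fun male => (recurrent, recurrent, male)))
    []

-- ===== PORT B =====
def threewayix_symab_anyab_backc_alt (ntaxa : Int) : List (Int × Int × Int) :=
  let n : Int := if ntaxa > 0 then ntaxa else 0
  (PySem.List.pyRange 0 (n * n) 1).map (fun k =>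
    let recurrent := PySem.Int.floordiv k n
    let other := PySem.Int.mod k n
    if other < recurrent then (recurrent, other, recurrent) else (recurrent, recurrent, other))

-- ===== PRECONDITION & SPEC =====
def Spec_threewayix_symab_anyab_backc (ntaxa : Int) (out : List (Int × Int × Int)) : Prop := out = threewayix_symab_anyab_backc_alt ntaxa
instance (ntaxa : Int) (out : List (Int × Int × Int)) : Decidable (Spec_threewayix_symab_anyab_backc ntaxa out) := by unfold Spec_threewayix_symab_anyab_backc; infer_instance

-- ===== CLAIM (what is proved, stated in full; the proofs are below) =====
def Claim_equal_threewayix_symab_anyab_backc : Prop := ∀ (ntaxa : Int), Dom_threewayix_symab_anyab_backc ntaxa → Spec_threewayix_symab_anyab_backc ntaxa (threewayix_symab_anyab_backc ntaxa)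

-- ===== LEMMAS AND PROOFS =====

-- A's result as a flatMap of the per-recurrent block.
theorem portA_flatMap (n : Int) :
    threewayix_symab_anyab_backc n =
      (PySem.List.pyRange 0 n 1).flatMap (fun r =>
        (PySem.List.pyRange 0 r 1).map (fun f => (r, f, r))
          ++ (PySem.List.pyRange r n 1).map (fun m => (r, r, m))) := by
  unfold threewayix_symab_anyab_backc
  have h : (PySem.List.pyRange 0 n 1).foldl
      (fun acc recurrent =>
        (acc ++ (PySem.List.pyRange 0 recurrent 1).map (fun female => (recurrent, female, recurrent)))
            ++ (PySem.List.pyRange recurrent n 1).map (fun male => (recurrent, recurrent, male)))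
      [] =
    (PySem.List.pyRange 0 n 1).foldl
      (fun acc r => acc ++
        ((PySem.List.pyRange 0 r 1).map (fun f => (r, f, r))
          ++ (PySem.List.pyRange r n 1).map (fun m => (r, r, m))))
      [] := by
    simp only [List.append_assoc]
  rw [h, PySem.List.foldl_append_eq_flatMap]
  simp

-- Splitting a flat range of n*(j+…) into per-recurrent chunks.
theorem chunk_split {α : Type} (n : Int) (hn : 0 ≤ n) (j : Nat) (f : Int → α) :
    (PySem.List.pyRange 0 ((j : Int) * n) 1).map f =
      (PySem.List.pyRange 0 (j : Int) 1).flatMap (fun r =>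
        (PySem.List.pyRange (r * n) (r * n + n) 1).map f) := by
  induction j with
  | zero => simp [PySem.List.pyRange_one_eq_nil]
  | succ j ih =>
      have h1 : (0 : Int) ≤ (j : Int) * n := by positivity
      have h2 : (j : Int) * n ≤ ((j : Int) + 1) * n := by nlinarith
      have hstep : PySem.List.pyRange 0 (((j : Int) + 1) * n) 1 =
          PySem.List.pyRange 0 ((j : Int) * n) 1
            ++ PySem.List.pyRange ((j : Int) * n) (((j : Int) + 1) * n) 1 := by
        exact PySem.List.pyRange_one_append 0 ((j : Int) * n) (((j : Int) + 1) * n) h1 h2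
      have hsucc : PySem.List.pyRange 0 ((j : Int) + 1) 1 =
          PySem.List.pyRange 0 (j : Int) 1 ++ [(j : Int)] :=
        PySem.List.pyRange_one_succ_right (Int.natCast_nonneg j)
      push_cast
      rw [hstep, hsucc, List.map_append, List.flatMap_append, ih]
      simp [add_mul]

-- The chunk for recurrent r equals A's per-recurrent block.
theorem chunk_eq_block (n r : Int) (h0 : 0 ≤ r) (h1 : r < n) :
    (PySem.List.pyRange (r * n) (r * n + n) 1).map (fun k =>
        if PySem.Int.mod k n < PySem.Int.floordiv k n
        then (PySem.Int.floordiv k n, PySem.Int.mod k n, PySem.Int.floordiv k n)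
        else (PySem.Int.floordiv k n, PySem.Int.floordiv k n, PySem.Int.mod k n)) =
      (PySem.List.pyRange 0 r 1).map (fun f => (r, f, r))
        ++ (PySem.List.pyRange r n 1).map (fun m => (r, r, m)) := by
  have hn : 0 < n := lt_of_le_of_lt h0 h1
  -- shift the chunk to a range starting at 0
  have hshift : PySem.List.pyRange (r * n) (r * n + n) 1 =
      (PySem.List.pyRange 0 n 1).map (fun o => r * n + o) := by
    rw [PySem.List.pyRange_one, PySem.List.pyRange_one]
    simp [List.map_map, Function.comp]
  rw [hshift, List.map_map]
  have hval : ∀ o ∈ PySem.List.pyRange 0 n 1,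
      ((fun k =>
        if PySem.Int.mod k n < PySem.Int.floordiv k n
        then (PySem.Int.floordiv k n, PySem.Int.mod k n, PySem.Int.floordiv k n)
        else (PySem.Int.floordiv k n, PySem.Int.floordiv k n, PySem.Int.mod k n)) ∘ (fun o => r * n + o)) o =
      (if o < r then ((r : Int), o, r) else (r, r, o)) := by
    intro o ho
    rw [PySem.List.mem_pyRange_one] at ho
    have hfd : PySem.Int.floordiv (r * n + o) n = r := by
      rw [PySem.Int.floordiv_eq_iff_of_pos hn]
      constructor <;> nlinarith [ho.1, ho.2]
    have hmod : PySem.Int.mod (r * n + o) n = o := by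
      have := PySem.Int.floordiv_mul_add_mod (r * n + o) n
      rw [hfd] at this
      omega
    simp only [Function.comp, hfd, hmod]
  rw [List.map_congr_left hval]
  -- now split the single range at r
  rw [PySem.List.pyRange_one_append 0 r n h0 (le_of_lt h1), List.map_append]
  congr 1
  · refine List.map_congr_left (fun o ho => ?_)
    rw [PySem.List.mem_pyRange_one] at ho
    simp [ho.2]
  · refine List.map_congr_left (fun o ho => ?_)
    rw [PySem.List.mem_pyRange_one] at ho
    simp [not_lt.mpr ho.1]

-- ===== VERDICT (by name: the statement is the Claim_ definition above) =====
theorem threewayix_symab_anyab_backc_spec : Claim_equal_threewayix_symab_anyab_backc := by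
  intro ntaxa _
  unfold Spec_threewayix_symab_anyab_backc threewayix_symab_anyab_backc_alt
  by_cases hpos : ntaxa > 0
  · simp only [if_pos hpos]
    obtain ⟨m, hm⟩ : ∃ m : Nat, ntaxa = (m : Int) :=
      ⟨ntaxa.toNat, (Int.toNat_of_nonneg (le_of_lt hpos)).symm⟩
    subst hm
    rw [chunk_split (m : Int) (le_of_lt hpos) m, portA_flatMap]
    refine List.flatMap_congr (fun r hr => ?_)
    rw [PySem.List.mem_pyRange_one] at hr
    exact (chunk_eq_block _ r hr.1 hr.2).symm
  · simp only [if_neg hpos]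
    rw [portA_flatMap]
    rw [PySem.List.pyRange_one_eq_nil (by omega : ntaxa ≤ 0)]
    simp [PySem.List.pyRange_one_eq_nil]
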